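-- pv_equiv track=rewrite | github.com/SkocicD/algorithms | kattis/medium/foodcarts/foodcarts.py | get_respective_r
-- ===== SOURCE A (Python) =====
-- def get_respective_r(allowed_ranges, l):
--     lower = 0
--     upper = len(allowed_ranges) - 1
--     while upper > lower:
--         middle = lower + (upper - lower)//2
--         if l < allowed_ranges[middle][0]:
--             upper = middle - 1
--
--         elif l == allowed_ranges[middle][0]:
--             return allowed_ranges[middle][1]
--         else:
--             lower = middle + 1
--     return allowed_ranges[lower][1]
-- ===== SOURCE B (Python) =====
-- def get_respective_r(allowed_ranges, l):
--     def go(lo, hi):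
--         if hi <= lo:
--             return allowed_ranges[lo][1]
--         mid = lo + (hi - lo) // 2
--         key, val = allowed_ranges[mid]
--         if l == key:
--             return val
--         if l < key:
--             return go(lo, mid - 1)
--         return go(mid + 1, hi)
--     return go(0, len(allowed_ranges) - 1)
-- ===== Notes on version B (the rewrite author's own statement) =====
-- stated objective: alternative
-- what changed: The iterative while-loop binary search with mutable lower/upper state is re-decomposed as a recursive divide-and-conquer helper go(lo, hi) with an early base case, destructuring the probed pair once and testing equality first.
import Mathlib
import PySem

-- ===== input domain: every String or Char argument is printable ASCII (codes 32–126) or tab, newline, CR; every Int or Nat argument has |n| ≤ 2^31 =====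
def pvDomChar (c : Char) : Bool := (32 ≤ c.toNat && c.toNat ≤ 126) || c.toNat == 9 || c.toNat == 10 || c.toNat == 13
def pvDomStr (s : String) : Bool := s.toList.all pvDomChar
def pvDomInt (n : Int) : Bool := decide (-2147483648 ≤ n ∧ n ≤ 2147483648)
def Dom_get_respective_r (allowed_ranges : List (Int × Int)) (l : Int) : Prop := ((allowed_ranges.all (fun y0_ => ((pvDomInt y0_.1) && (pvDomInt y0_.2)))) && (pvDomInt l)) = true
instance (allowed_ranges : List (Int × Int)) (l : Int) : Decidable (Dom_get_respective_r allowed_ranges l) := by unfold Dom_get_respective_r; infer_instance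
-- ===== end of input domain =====

-- B re-decomposes A's iterative while-loop binary search as a recursive
-- divide-and-conquer helper over (lo, hi); same comparisons and index paths, no speed claim.

-- ===== PORT A =====
-- allowed_ranges[i]; index is always in range inside Pre_, so the default is never used there
def pvIdx (a : List (Int × Int)) (i : Int) : Int × Int := PySem.List.pyGetD a i (0, 0)

-- the while-loop of A, state (lower, upper)
def pvLoopA (a : List (Int × Int)) (l : Int) (lower upper : Int) : Int :=
  if _h : upper > lower then
    let middle := lower + PySem.Int.floordiv (upper - lower) 2
    if l < (pvIdx a middle).1 then
      pvLoopA a l lower (middle - 1)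
    else if l = (pvIdx a middle).1 then
      (pvIdx a middle).2
    else
      pvLoopA a l (middle + 1) upper
  else
    (pvIdx a lower).2
termination_by (upper - lower).toNat
decreasing_by
  all_goals simp only [PySem.Int.floordiv_eq_ediv_of_pos (show (0:Int) < 2 by norm_num)]
  all_goals omega

def get_respective_r (allowed_ranges : List (Int × Int)) (l : Int) : Int :=
  pvLoopA allowed_ranges l 0 (allowed_ranges.length - 1)

-- ===== PORT B =====
-- the recursive divide-and-conquer helper go(lo, hi) of Source B
def pvGoB (a : List (Int × Int)) (l : Int) (lo hi : Int) : Int :=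
  if _h : hi ≤ lo then
    (pvIdx a lo).2
  else
    let mid := lo + PySem.Int.floordiv (hi - lo) 2
    let kv := pvIdx a mid
    if l = kv.1 then kv.2
    else if l < kv.1 then pvGoB a l lo (mid - 1)
    else pvGoB a l (mid + 1) hi
termination_by (hi - lo).toNat
decreasing_by
  all_goals simp only [PySem.Int.floordiv_eq_ediv_of_pos (show (0:Int) < 2 by norm_num)]
  all_goals omega

def get_respective_r_alt (allowed_ranges : List (Int × Int)) (l : Int) : Int :=
  pvGoB allowed_ranges l 0 (allowed_ranges.length - 1)

-- ===== PRECONDITION & SPEC =====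
-- Pre_ excludes only the empty list, on which Python A (and B) raise IndexError.
def Pre_get_respective_r (allowed_ranges : List (Int × Int)) (l : Int) : Prop :=
  allowed_ranges ≠ []
instance (allowed_ranges : List (Int × Int)) (l : Int) : Decidable (Pre_get_respective_r allowed_ranges l) := by unfold Pre_get_respective_r; infer_instance

def pvWitness_get_respective_r : (List (Int × Int)) × Int := ([(1, 2)], 1)

def Spec_get_respective_r (allowed_ranges : List (Int × Int)) (l : Int) (out : Int) : Prop := out = get_respective_r_alt allowed_ranges l
instance (allowed_ranges : List (Int × Int)) (l : Int) (out : Int) : Decidable (Spec_get_respective_r allowed_ranges l out) := by unfold Spec_get_respective_r; infer_instance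

-- ===== CLAIM (what is proved, stated in full; the proofs are below) =====
def Claim_equal_get_respective_r : Prop := ∀ (allowed_ranges : List (Int × Int)) (l : Int), Dom_get_respective_r allowed_ranges l → Pre_get_respective_r allowed_ranges l → Spec_get_respective_r allowed_ranges l (get_respective_r allowed_ranges l)

-- ===== LEMMAS AND PROOFS =====

-- A's loop and B's recursion compute the same value for every window (lo, hi)
theorem pvLoopA_eq_pvGoB (a : List (Int × Int)) (l lo hi : Int) :
    pvLoopA a l lo hi = pvGoB a l lo hi := by
  induction lo, hi using pvLoopA.induct a l with
  | case1 lower upper h mid hlt ih =>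
    rw [pvLoopA, pvGoB]
    simp only [show lower + PySem.Int.floordiv (upper - lower) 2 = mid from rfl]
    simp only [dif_pos h, dif_neg (show ¬upper ≤ lower by omega), if_pos hlt,
      if_neg (ne_of_lt hlt), ih]
  | case2 lower upper h mid hnlt heq =>
    rw [pvLoopA, pvGoB]
    simp only [show lower + PySem.Int.floordiv (upper - lower) 2 = mid from rfl]
    simp only [dif_pos h, dif_neg (show ¬upper ≤ lower by omega), if_neg hnlt, if_pos heq]
  | case3 lower upper h mid hnlt hne ih =>
    rw [pvLoopA, pvGoB]
    simp only [show lower + PySem.Int.floordiv (upper - lower) 2 = mid from rfl]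
    simp only [dif_pos h, dif_neg (show ¬upper ≤ lower by omega), if_neg hne, if_neg hnlt, ih]
  | case4 lower upper h =>
    rw [pvLoopA, pvGoB]
    simp only [dif_neg h, dif_pos (show upper ≤ lower by omega)]

-- ===== VERDICT (by name: the statement is the Claim_ definition above) =====
theorem get_respective_r_spec : Claim_equal_get_respective_r := by
  intro a l _ _
  unfold Spec_get_respective_r get_respective_r get_respective_r_alt
  exact pvLoopA_eq_pvGoB a l 0 (a.length - 1)
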